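-- pv_equiv track=rewrite | github.com/N1ck7/CodeWars_python | 6 kyu Remove the parentheses.py | remove_parentheses
-- ===== SOURCE A (Python) =====
-- def remove_parentheses(s):
--     parentheses_count = 0
--     output = ""
--     for i in s:
--         if i=="(":
--             parentheses_count += 1
--         elif i==")":
--             parentheses_count -= 1
--         else:
--             if parentheses_count == 0:
--                 output += i
--     return output
-- ===== SOURCE B (Python) =====
-- def remove_parentheses(s):
--     # Scanner with a skip subroutine: the outer loop copies characters verbatim and
--     # carries no depth counter; on meeting '(' or ')' an inner loop consumes the whole
--     # region until the net parenthesis balance returns to zero, then copying resumes.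
--     out = []
--     i, n = 0, len(s)
--     while i < n:
--         c = s[i]
--         if c == "(" or c == ")":
--             d = 1 if c == "(" else -1
--             i += 1
--             while i < n and d != 0:
--                 d += (s[i] == "(") - (s[i] == ")")
--                 i += 1
--         else:
--             out.append(c)
--             i += 1
--     return "".join(out)
-- ===== Notes on version B (the rewrite author's own statement) =====
-- stated objective: alternative
-- what changed: Replaces A's single loop that tests a running depth counter on every character with a two-level scanner: an outer loop that copies characters verbatim with no counter, and an inner skip subroutine that consumes an entire parenthesized (or negative-balance) region until its net balance returns to zero.
import Mathlib
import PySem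

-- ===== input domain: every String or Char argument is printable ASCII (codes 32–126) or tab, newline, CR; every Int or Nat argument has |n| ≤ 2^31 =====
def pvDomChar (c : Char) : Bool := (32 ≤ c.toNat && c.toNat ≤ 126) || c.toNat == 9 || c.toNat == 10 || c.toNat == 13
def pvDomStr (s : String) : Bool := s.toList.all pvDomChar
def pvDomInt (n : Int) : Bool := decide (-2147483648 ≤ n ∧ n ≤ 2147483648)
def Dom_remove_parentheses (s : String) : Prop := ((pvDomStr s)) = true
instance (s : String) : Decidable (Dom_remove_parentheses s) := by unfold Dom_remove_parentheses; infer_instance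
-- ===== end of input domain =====

-- B replaces A's per-character depth-counter test by a two-level scanner: a copy loop with no counter plus a skip subroutine consuming each balanced region (alternative decomposition; return values proved equal).

-- ===== PORT A =====
-- A: one loop carrying (parentheses_count, output); append i when count = 0 and i is not a parenthesis.
def remove_parentheses (s : String) : String :=
  String.ofList (s.toList.foldl
    (fun (st : Int × List Char) i =>
      if i = '(' then (st.1 + 1, st.2)
      else if i = ')' then (st.1 - 1, st.2)
      else if st.1 = 0 then (st.1, st.2 ++ [i]) else st)
    (0, [])).2

-- ===== PORT B =====
-- B's inner while loop: consume characters until the region's net balance d returns to 0.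
def skipB (d : Int) : List Char → List Char
  | [] => []
  | c :: t =>
    if d = 0 then c :: t
    else skipB (d + ((if c = '(' then (1 : Int) else 0) - (if c = ')' then (1 : Int) else 0))) t

theorem skipB_length_le (d : Int) (l : List Char) : (skipB d l).length ≤ l.length := by
  induction l generalizing d with
  | nil => simp [skipB]
  | cons c t ih =>
    simp only [skipB]
    by_cases h : d = 0
    · simp [h]
    · rw [if_neg h]
      exact (ih _).trans (by simp)

-- B's outer while loop: copy a non-paren char; on a paren, hand the rest to skipB and resume.
def goB (l : List Char) : List Char :=
  match l with
  | [] => []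
  | c :: t =>
    if c = '(' then goB (skipB 1 t)
    else if c = ')' then goB (skipB (-1) t)
    else c :: goB t
termination_by l.length
decreasing_by
  · exact Nat.lt_succ_of_le (skipB_length_le 1 t)
  · exact Nat.lt_succ_of_le (skipB_length_le (-1) t)
  · exact Nat.lt_succ_self _

def remove_parentheses_alt (s : String) : String := String.ofList (goB s.toList)

-- ===== PRECONDITION & SPEC =====
def Spec_remove_parentheses (s : String) (out : String) : Prop := out = remove_parentheses_alt s
instance (s : String) (out : String) : Decidable (Spec_remove_parentheses s out) := by unfold Spec_remove_parentheses; infer_instance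

-- ===== CLAIM (what is proved, stated in full; the proofs are below) =====
def Claim_equal_remove_parentheses : Prop := ∀ (s : String), Dom_remove_parentheses s → Spec_remove_parentheses s (remove_parentheses s)

-- ===== LEMMAS AND PROOFS =====

-- recursive characterisation of A's output from count d
def outRec (d : Int) : List Char → List Char
  | [] => []
  | c :: t =>
    if c = '(' then outRec (d + 1) t
    else if c = ')' then outRec (d - 1) t
    else if d = 0 then c :: outRec d t else outRec d t

theorem foldA_eq (l : List Char) : ∀ (d : Int) (acc : List Char),
    (l.foldl
      (fun (st : Int × List Char) i =>
        if i = '(' then (st.1 + 1, st.2)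
        else if i = ')' then (st.1 - 1, st.2)
        else if st.1 = 0 then (st.1, st.2 ++ [i]) else st)
      (d, acc)).2 = acc ++ outRec d l := by
  induction l with
  | nil => intro d acc; simp [outRec]
  | cons c t ih =>
    intro d acc
    simp only [List.foldl, outRec]
    split_ifs <;> simp [*]

theorem skipB_zero (l : List Char) : skipB 0 l = l := by
  cases l <;> simp [skipB]

-- While the counter is nonzero, A produces nothing; it resumes at 0 exactly where skipB stops.
theorem outRec_skip (l : List Char) : ∀ (d : Int), d ≠ 0 → outRec d l = outRec 0 (skipB d l) := by
  induction l with
  | nil => intro d hd; simp [outRec, skipB]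
  | cons c t ih =>
    intro d hd
    by_cases h1 : c = '('
    · subst h1
      simp only [outRec, skipB, if_neg hd, if_true, if_false,
        show (('(' : Char) = ')') = False from by decide, sub_zero]
      by_cases h0 : d + 1 = 0
      · rw [h0, skipB_zero]
      · exact ih (d + 1) h0
    · by_cases h2 : c = ')'
      · subst h2
        simp only [outRec, skipB, if_neg hd, if_true, if_false,
          show ((')' : Char) = '(') = False from by decide, zero_sub]
        rw [show d + (-1 : Int) = d - 1 from by ring]
        by_cases h0 : d - 1 = 0
        · rw [h0, skipB_zero]
        · exact ih (d - 1) h0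
      · simp only [outRec, skipB, if_neg hd, if_neg h1, if_neg h2, sub_zero, add_zero]
        exact ih d hd

theorem goB_eq_outRec : ∀ (n : Nat) (l : List Char), l.length = n → goB l = outRec 0 l := by
  intro n
  induction n using Nat.strong_induction_on with
  | _ n ih =>
    intro l hl
    match l with
    | [] => simp [goB, outRec]
    | c :: t =>
      subst hl
      rw [goB]
      by_cases h1 : c = '('
      · rw [if_pos h1,
          ih (skipB 1 t).length (Nat.lt_succ_of_le (skipB_length_le 1 t)) _ rfl,
          ← outRec_skip t 1 one_ne_zero]
        subst h1
        simp only [outRec, if_true]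
        rw [show (0 : Int) + 1 = 1 from by norm_num]
      · by_cases h2 : c = ')'
        · rw [if_neg h1, if_pos h2,
            ih (skipB (-1) t).length (Nat.lt_succ_of_le (skipB_length_le (-1) t)) _ rfl,
            ← outRec_skip t (-1) (by norm_num)]
          subst h2
          simp only [outRec, if_neg h1, if_true]
          rw [show (0 : Int) - 1 = -1 from by norm_num]
        · rw [if_neg h1, if_neg h2,
            ih t.length (Nat.lt_succ_self _) t rfl]
          simp [outRec, h1, h2]

-- ===== VERDICT (by name: the statement is the Claim_ definition above) =====
theorem remove_parentheses_spec : Claim_equal_remove_parentheses := by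
  intro s _
  show remove_parentheses s = remove_parentheses_alt s
  unfold remove_parentheses remove_parentheses_alt
  rw [foldA_eq, goB_eq_outRec s.toList.length s.toList rfl]
  simp
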